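-- pv_equiv track=rewrite | github.com/Lussebullen/Math182 | MaxSubarray.py | MaxRight
-- ===== SOURCE A (Python) =====
-- def MaxRight(A,mid):
--     best = 0
--     sum = 0
--     # Different indexing for slicing and regular indexes, shift left
--     i = mid
--     while i<=len(A)-1:
--         sum = sum + A[i]
--         best = max(best, sum)
--         i = i + 1
--     return best
-- ===== SOURCE B (Python) =====
-- def MaxRight(A, mid):
--     # right-to-left recurrence: best = max achievable prefix value continuable from i
--     best = 0
--     for i in range(len(A) - 1, mid - 1, -1):
--         best = max(0, A[i] + best)
--     return best
-- ===== Notes on version B (the rewrite author's own statement) =====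
-- stated objective: alternative
-- what changed: Replaces the left-to-right running-cumulative-sum-plus-running-max loop by a single right-to-left fold best = max(0, A[i] + best) over the same index range, maintaining only one accumulator (the best prefix value continuable from position i).
import Mathlib
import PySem

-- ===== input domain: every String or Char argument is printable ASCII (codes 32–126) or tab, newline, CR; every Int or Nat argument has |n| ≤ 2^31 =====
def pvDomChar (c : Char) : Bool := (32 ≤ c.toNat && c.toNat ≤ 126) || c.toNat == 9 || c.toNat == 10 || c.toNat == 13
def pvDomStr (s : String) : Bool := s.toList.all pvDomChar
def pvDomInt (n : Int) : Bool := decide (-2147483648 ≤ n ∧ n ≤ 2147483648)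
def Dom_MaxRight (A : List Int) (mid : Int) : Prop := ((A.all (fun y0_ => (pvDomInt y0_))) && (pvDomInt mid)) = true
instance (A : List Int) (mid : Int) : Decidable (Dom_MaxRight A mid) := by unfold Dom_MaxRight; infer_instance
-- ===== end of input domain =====

-- B replaces A's left-to-right cumulative-sum + running-max loop by a single
-- right-to-left fold best = max(0, A[i] + best); alternative decomposition, same cost.

-- ===== PORT A =====
-- while loop of A, one fuel unit per iteration (fuel = number of remaining indices)
def maxRightGo (A : List Int) (i sum best : Int) : Nat → Int
  | 0 => best
  | fuel + 1 =>
    if i ≤ (A.length : Int) - 1 then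
      let sum' := sum + PySem.List.pyGetD A i 0
      maxRightGo A (i + 1) sum' (max best sum') fuel
    else best

def MaxRight (A : List Int) (mid : Int) : Int :=
  maxRightGo A mid 0 0 ((A.length : Int) - mid).toNat

-- ===== PORT B =====
def MaxRight_alt (A : List Int) (mid : Int) : Int :=
  (PySem.List.pyRange ((A.length : Int) - 1) (mid - 1) (-1)).foldl
    (fun best i => max 0 (PySem.List.pyGetD A i 0 + best)) 0

-- ===== PRECONDITION & SPEC =====
-- A raises IndexError when mid < -len(A) (first access A[mid] is out of range); excluded here.
def Pre_MaxRight (A : List Int) (mid : Int) : Prop := -(A.length : Int) ≤ mid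
instance (A : List Int) (mid : Int) : Decidable (Pre_MaxRight A mid) := by unfold Pre_MaxRight; infer_instance
def pvWitness_MaxRight : List Int × Int := ([1, -2, 3], 0)

def Spec_MaxRight (A : List Int) (mid : Int) (out : Int) : Prop := out = MaxRight_alt A mid
instance (A : List Int) (mid : Int) (out : Int) : Decidable (Spec_MaxRight A mid out) := by unfold Spec_MaxRight; infer_instance

-- ===== CLAIM (what is proved, stated in full; the proofs are below) =====
def Claim_equal_MaxRight : Prop := ∀ (A : List Int) (mid : Int), Dom_MaxRight A mid → Pre_MaxRight A mid → Spec_MaxRight A mid (MaxRight A mid)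

-- ===== LEMMAS AND PROOFS =====

-- B's fold, written as a foldr over the forward index range
def mAux (A : List Int) (l : List Int) : Int :=
  l.foldr (fun i b => max 0 (PySem.List.pyGetD A i 0 + b)) 0

theorem mAux_nonneg (A : List Int) (l : List Int) : 0 ≤ mAux A l := by
  induction l with
  | nil => simp [mAux]
  | cons x xs ih => simp only [mAux, List.foldr] at *; omega

theorem alt_eq_mAux (A : List Int) (mid : Int) :
    MaxRight_alt A mid = mAux A (PySem.List.pyRange mid (A.length : Int) 1) := by
  unfold MaxRight_alt mAux
  have h : PySem.List.pyRange ((A.length : Int) - 1) (mid - 1) (-1)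
      = (PySem.List.pyRange mid (A.length : Int) 1).reverse := by
    have := PySem.List.pyRange_neg_one_eq_reverse ((A.length : Int) - 1) (mid - 1)
    simpa using this
  rw [h, List.foldl_reverse]

theorem goA_eq (A : List Int) :
    ∀ (fuel : Nat) (i sum best : Int),
      (A.length : Int) - i ≤ fuel → sum ≤ best → 0 ≤ best →
      maxRightGo A i sum best fuel
        = max best (sum + mAux A (PySem.List.pyRange i (A.length : Int) 1)) := by
  intro fuel
  induction fuel with
  | zero =>
    intro i sum best hf hs hb
    rw [PySem.List.pyRange_one_eq_nil (by omega)]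
    simp [maxRightGo, mAux]
    omega
  | succ f ih =>
    intro i sum best hf hs hb
    by_cases hi : i ≤ (A.length : Int) - 1
    · rw [PySem.List.pyRange_one_cons (by omega)]
      simp only [maxRightGo, if_pos hi]
      rw [ih (i + 1) (sum + PySem.List.pyGetD A i 0) (max best (sum + PySem.List.pyGetD A i 0))
            (by omega) (le_max_right _ _) (le_trans hb (le_max_left _ _))]
      have hm := mAux_nonneg A (PySem.List.pyRange (i + 1) (A.length : Int) 1)
      simp only [mAux, List.foldr] at hm ⊢
      omega
    · rw [PySem.List.pyRange_one_eq_nil (by omega)]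
      simp only [maxRightGo, if_neg hi, mAux, List.foldr]
      omega

-- ===== VERDICT (by name: the statement is the Claim_ definition above) =====
theorem MaxRight_spec : Claim_equal_MaxRight := by
  intro A mid _ _
  unfold Spec_MaxRight MaxRight
  rw [alt_eq_mAux, goA_eq A _ mid 0 0 (by omega) le_rfl le_rfl]
  have := mAux_nonneg A (PySem.List.pyRange mid (A.length : Int) 1)
  omega
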